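-- pv_equiv track=rewrite | github.com/kelvinhuang0327/number-pattern-research | tools/exhaustive_nbet_benchmark.py | method_anti_repeat
-- ===== SOURCE A (Python) =====
-- from typing import List, Dict, Callable, Tuple
-- from collections import Counter
--
-- def method_anti_repeat(history: List[Dict], max_num: int) -> List[int]:
--     """Avoid all numbers from last draw."""
--     if not history:
--         return list(range(1, 7))
--
--     last = set(history[0]['numbers'])
--     candidates = [n for n in range(1, max_num + 1) if n not in last]
--
--     # From candidates, pick by frequency
--     recent = history[:50]
--     counter = Counter()
--     for d in recent:
--         counter.update(d['numbers'])
--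
--     cand_scores = [(n, counter.get(n, 0)) for n in candidates]
--     cand_scores.sort(key=lambda x: x[1], reverse=True)
--
--     return [n for n, _ in cand_scores[:6]]
-- ===== SOURCE B (Python) =====
-- from typing import List, Dict
-- from collections import Counter
--
-- def method_anti_repeat(history: List[Dict], max_num: int) -> List[int]:
--     """Avoid all numbers from last draw; bucket-select by recent frequency instead of sorting."""
--     if not history:
--         return list(range(1, 7))
--
--     last = set(history[0]['numbers'])
--
--     counter = Counter()
--     for d in history[:50]:
--         counter.update(d['numbers'])
--
--     # buckets[f] = candidates with frequency f, in ascending order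
--     buckets = {}
--     top = 0
--     for n in range(1, max_num + 1):
--         if n in last:
--             continue
--         f = counter.get(n, 0)
--         buckets.setdefault(f, []).append(n)
--         if f > top:
--             top = f
--
--     result = []
--     for f in range(top, -1, -1):
--         result.extend(buckets.get(f, []))
--     return result[:6]
-- ===== Notes on version B (the rewrite author's own statement) =====
-- stated objective: alternative
-- what changed: B replaces A's build-pairs-then-comparison-sort selection by a frequency-bucket dict filled while scanning candidates ascending (tracking the maximum frequency) and walked from the highest frequency down to 0, reproducing the stable descending-frequency, ascending-number order without sorting.
import Mathlib
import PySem

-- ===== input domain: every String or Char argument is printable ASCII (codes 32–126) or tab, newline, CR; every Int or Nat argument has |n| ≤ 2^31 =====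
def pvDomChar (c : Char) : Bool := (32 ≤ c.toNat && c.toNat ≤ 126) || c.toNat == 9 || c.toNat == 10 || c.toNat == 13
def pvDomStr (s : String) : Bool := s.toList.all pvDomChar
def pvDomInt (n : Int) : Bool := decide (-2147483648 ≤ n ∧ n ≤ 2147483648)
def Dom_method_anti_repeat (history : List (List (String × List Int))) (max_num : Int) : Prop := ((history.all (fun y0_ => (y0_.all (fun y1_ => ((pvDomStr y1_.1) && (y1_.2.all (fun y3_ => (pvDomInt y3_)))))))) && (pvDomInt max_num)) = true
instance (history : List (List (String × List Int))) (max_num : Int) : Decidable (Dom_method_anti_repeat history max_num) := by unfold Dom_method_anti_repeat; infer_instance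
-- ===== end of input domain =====

-- B replaces A's comparison sort of (candidate, score) pairs by a frequency-bucket dict walked
-- from the highest frequency down (counting selection); same return value, different algorithm.

-- shared transliteration helpers (both Pythons contain these same lines):
-- d['numbers'] lookup (total form; Pre_ guarantees the key is present)
def pvNums (dd : List (String × List Int)) : List Int :=
  ((PySem.Dict.mk dd).get? "numbers").getD []

-- last = set(history[0]['numbers'])
def pvLast (history : List (List (String × List Int))) : PySem.Set Int :=
  PySem.Set.ofList (pvNums (PySem.List.pyGetD history 0 []))

-- counter = Counter(); for d in history[:50]: counter.update(d['numbers'])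
def pvCounter (history : List (List (String × List Int))) : PySem.Dict Int Int :=
  (PySem.List.slice history none (some 50)).foldl
    (fun d dd => (pvNums dd).foldl (fun d x => d.modify x 0 (· + 1)) d) PySem.Dict.empty

-- ===== PORT A =====
def method_anti_repeat (history : List (List (String × List Int))) (max_num : Int) : List Int :=
  if history = [] then PySem.List.pyRange 1 7 1
  else
    let last := pvLast history
    let candidates := (PySem.List.pyRange 1 (max_num + 1) 1).filter
      (fun n => !(PySem.Set.contains last n))
    let counter := pvCounter history
    let cand_scores := candidates.map (fun n => (n, counter.getD n 0))
    let ss := PySem.List.sorted cand_scores (fun p => p.2) true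
    (PySem.List.slice ss none (some 6)).map (fun p => p.1)

-- ===== PORT B =====
def method_anti_repeat_alt (history : List (List (String × List Int))) (max_num : Int) : List Int :=
  if history = [] then PySem.List.pyRange 1 7 1
  else
    let last := pvLast history
    let counter := pvCounter history
    -- buckets/top loop: buckets.setdefault(f, []).append(n); if f > top: top = f
    let st := (PySem.List.pyRange 1 (max_num + 1) 1).foldl
      (fun (st : PySem.Dict Int (List Int) × Int) n =>
        if PySem.Set.contains last n then st
        else
          let f := counter.getD n 0
          (st.1.modify f [] (· ++ [n]), if f > st.2 then f else st.2))
      (PySem.Dict.empty, 0)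
    -- for f in range(top, -1, -1): result.extend(buckets.get(f, []))
    let result := (PySem.List.pyRange st.2 (-1) (-1)).foldl
      (fun acc f => acc ++ st.1.getD f []) []
    PySem.List.slice result none (some 6)

-- ===== PRECONDITION & SPEC =====
-- Pre_ excludes histories in which one of the first 50 draws lacks the 'numbers' key:
-- there Python A raises KeyError (it returns no value), so nothing is claimed.
def Pre_method_anti_repeat (history : List (List (String × List Int))) (max_num : Int) : Prop :=
  ∀ dd ∈ PySem.List.slice history none (some 50), ((PySem.Dict.mk dd).get? "numbers").isSome = true

instance (history : List (List (String × List Int))) (max_num : Int) : Decidable (Pre_method_anti_repeat history max_num) := by unfold Pre_method_anti_repeat; infer_instance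

def pvWitness_method_anti_repeat : (List (List (String × List Int))) × Int :=
  ([[("numbers", [1, 2])]], 3)

def Spec_method_anti_repeat (history : List (List (String × List Int))) (max_num : Int) (out : List Int) : Prop := out = method_anti_repeat_alt history max_num
instance (history : List (List (String × List Int))) (max_num : Int) (out : List Int) : Decidable (Spec_method_anti_repeat history max_num out) := by unfold Spec_method_anti_repeat; infer_instance

-- ===== CLAIM (what is proved, stated in full; the proofs are below) =====
def Claim_equal_method_anti_repeat : Prop := ∀ (history : List (List (String × List Int))) (max_num : Int), Dom_method_anti_repeat history max_num → Pre_method_anti_repeat history max_num → Spec_method_anti_repeat history max_num (method_anti_repeat history max_num)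

-- ===== LEMMAS AND PROOFS =====

-- insertBy walks past a prefix it never inserts into
lemma insertBy_skip {α : Type} (before : α → α → Bool) (x : α) (p s : List α)
    (h : ∀ y ∈ p, before x y = false) :
    PySem.List.insertBy before x (p ++ s) = p ++ PySem.List.insertBy before x s := by
  induction p with
  | nil => rfl
  | cons y p ih =>
    have hy : before x y = false := h y (by simp)
    simp [PySem.List.insertBy, hy]
    exact ih (fun z hz => h z (by simp [hz]))

-- inserting into a concatenation of strictly-descending-key buckets appends to x's bucket
lemma insertBy_flatMap {α : Type} (key : α → Int) (x : α) (ks : List Int) (f : Int → List α)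
    (hp : ks.Pairwise (· > ·)) (hx : key x ∈ ks)
    (hf : ∀ k ∈ ks, ∀ y ∈ f k, key y = k) :
    PySem.List.insertBy (fun a b => decide (key b < key a)) x (ks.flatMap f)
      = ks.flatMap (fun k => if key x = k then f k ++ [x] else f k) := by
  induction ks with
  | nil => simp at hx
  | cons k ks ih =>
    have hk : ∀ y ∈ f k, key y = k := hf k (by simp)
    have hgt : ∀ k' ∈ ks, k > k' := fun k' hk' => (List.pairwise_cons.mp hp).1 k' hk'
    by_cases hxk : key x = k
    · have hskip : ∀ y ∈ f k, (decide (key y < key x)) = false := by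
        intro y hy; simp [hk y hy, hxk]
      have hrest : ∀ z ∈ ks.flatMap f, key z < key x := by
        intro z hz
        obtain ⟨k', hk', hz'⟩ := List.mem_flatMap.mp hz
        have hzk : key z = k' := hf k' (by simp [hk']) z hz'
        have := hgt k' hk'
        omega
      have hins : PySem.List.insertBy (fun a b => decide (key b < key a)) x (ks.flatMap f)
          = x :: ks.flatMap f := by
        cases hc : ks.flatMap f with
        | nil => simp [PySem.List.insertBy]
        | cons z zs =>
          have := hrest z (by rw [hc]; simp)
          simp [PySem.List.insertBy, this]
      have hrest2 : ks.flatMap (fun k' => if key x = k' then f k' ++ [x] else f k') = ks.flatMap f := by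
        simp only [List.flatMap]
        congr 1
        apply List.map_congr_left
        intro k' hk'
        have := hgt k' hk'
        have : key x ≠ k' := by omega
        simp [this]
      rw [List.flatMap_cons, insertBy_skip _ _ _ _ hskip, hins,
          List.flatMap_cons, if_pos hxk, hrest2]
      simp
    · have hxks : key x ∈ ks := by
        rcases List.mem_cons.mp hx with h | h
        · exact absurd h hxk
        · exact h
      have hxlt : key x < k := by
        have := hgt _ hxks; omega
      have hskip : ∀ y ∈ f k, (decide (key y < key x)) = false := by
        intro y hy
        have := hk y hy
        simp [this]; omega
      rw [List.flatMap_cons, insertBy_skip _ _ _ _ hskip,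
          ih (List.pairwise_cons.mp hp).2 hxks (fun k' h' y hy => hf k' (by simp [h']) y hy),
          List.flatMap_cons, if_neg hxk]

-- the stable descending sort is the concatenation of the per-key buckets, highest key first
lemma sorted_rev_eq_flatMap {α : Type} (key : α → Int) (ks : List Int)
    (hks : ks.Pairwise (· > ·)) :
    ∀ (xs : List α), (∀ x ∈ xs, key x ∈ ks) →
    PySem.List.sorted xs key true = ks.flatMap (fun k => xs.filter (fun x => decide (key x = k))) := by
  intro xs
  induction xs using List.reverseRecOn with
  | nil => intro _; simp [PySem.List.sorted]
  | append_singleton xs x ih =>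
    intro h
    have hxs : ∀ y ∈ xs, key y ∈ ks := fun y hy => h y (by simp [hy])
    have hx : key x ∈ ks := h x (by simp)
    rw [PySem.List.sorted_rev_eq_foldl_insertBy, List.foldl_append, List.foldl_cons, List.foldl_nil,
        ← PySem.List.sorted_rev_eq_foldl_insertBy, ih hxs,
        insertBy_flatMap key x ks _ hks hx
          (fun k _ y hy => by simpa using (List.mem_filter.mp hy).2)]
    congr 1
    funext k
    by_cases hxk : key x = k <;> simp [List.filter_append, hxk]

-- the nested Counter.update loop is one loop over the flattened draws
lemma counter_loop_eq (l : List (List (String × List Int))) (d : PySem.Dict Int Int) :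
    l.foldl (fun d dd => (pvNums dd).foldl (fun d x => d.modify x 0 (· + 1)) d) d
      = ((l.map pvNums).flatten).foldl (fun d x => d.modify x 0 (· + 1)) d := by
  induction l generalizing d with
  | nil => rfl
  | cons dd l ih => simp [ih, List.foldl_append]

lemma pvCounter_getD_nonneg (h : List (List (String × List Int))) (v : Int) :
    0 ≤ (pvCounter h).getD v 0 := by
  unfold pvCounter
  rw [counter_loop_eq, PySem.Dict.getD_foldl_modify_add_one]
  simp

-- ===== VERDICT (by name: the statement is the Claim_ definition above) =====
theorem method_anti_repeat_spec : Claim_equal_method_anti_repeat := by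
  intro history max_num _hdom _hpre
  unfold Spec_method_anti_repeat method_anti_repeat method_anti_repeat_alt
  by_cases hnil : history = []
  · simp [hnil]
  · simp only [if_neg hnil]
    set L := pvLast history with hL
    set C := pvCounter history with hC
    set cand := (PySem.List.pyRange 1 (max_num + 1) 1).filter
      (fun n => !(PySem.Set.contains L n)) with hcand
    -- B's skip-loop is a loop over the same filtered candidate list
    have hstep : (fun (st : PySem.Dict Int (List Int) × Int) n =>
        if PySem.Set.contains L n then st
        else (st.1.modify (C.getD n 0) [] (· ++ [n]),
              if C.getD n 0 > st.2 then C.getD n 0 else st.2))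
        = (fun (st : PySem.Dict Int (List Int) × Int) n =>
            if (!(PySem.Set.contains L n)) then
              (st.1.modify (C.getD n 0) [] (· ++ [n]),
               if C.getD n 0 > st.2 then C.getD n 0 else st.2)
            else st) := by
      funext st n; cases hq : PySem.Set.contains L n <;> simp [hq]
    rw [hstep, PySem.List.foldl_if_eq_foldl_filter, ← hcand,
        PySem.List.foldl_prod_mk
          (f := fun (d : PySem.Dict Int (List Int)) n => d.modify (C.getD n 0) [] (· ++ [n]))
          (g := fun t n => if C.getD n 0 > t then C.getD n 0 else t)]
    set top := cand.foldl (fun t n => if C.getD n 0 > t then C.getD n 0 else t) 0 with htop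
    have htopmax : 0 ≤ top ∧ ∀ n ∈ cand, C.getD n 0 ≤ top := by
      have hmax : (fun t n => if C.getD n 0 > t then C.getD n 0 else t)
          = (fun t n => max t (C.getD n 0)) := by
        funext t n; rcases max_cases t (C.getD n 0) with ⟨h1, h2⟩ | ⟨h1, h2⟩ <;>
          simp [h1] <;> omega
      rw [htop, hmax]
      have := PySem.List.le_foldl_max_int cand (fun n => C.getD n 0) 0
      exact ⟨this.1, this.2⟩
    set ks := PySem.List.pyRange top (-1) (-1) with hks
    have hksp : ks.Pairwise (· > ·) := by
      rw [hks, PySem.List.pyRange_neg_one_eq_reverse, List.pairwise_reverse]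
      exact PySem.List.pairwise_lt_pyRange_one _ _
    have hmem : ∀ n ∈ cand, C.getD n 0 ∈ ks := by
      intro n hn
      rw [hks, PySem.List.mem_pyRange_neg_one]
      have h0 : 0 ≤ C.getD n 0 := by rw [hC]; exact pvCounter_getD_nonneg history n
      have := htopmax.2 n hn
      constructor <;> omega
    -- buckets.get(f, []) is the ascending candidates of frequency f
    have hbucket : ∀ k, (cand.foldl (fun (d : PySem.Dict Int (List Int)) n =>
          d.modify (C.getD n 0) [] (· ++ [n])) PySem.Dict.empty).getD k []
        = cand.filter (fun n => decide (C.getD n 0 = k)) := by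
      intro k
      rw [show (cand.foldl (fun (d : PySem.Dict Int (List Int)) n =>
            d.modify (C.getD n 0) [] (· ++ [n])) PySem.Dict.empty)
          = ((cand.map (fun n => (C.getD n 0, n))).foldl
              (fun (d : PySem.Dict Int (List Int)) p => d.modify p.1 [] (· ++ [p.2]))
              PySem.Dict.empty)
          from (List.foldl_map (f := fun n => (C.getD n 0, n))
              (g := fun (d : PySem.Dict Int (List Int)) p => d.modify p.1 [] (· ++ [p.2]))).symm,
          PySem.Dict.getD_foldl_modify_append, List.filter_map, List.map_map]
      simp only [Function.comp_def, PySem.Dict.getD_empty, List.nil_append, List.map_id']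
      refine List.filter_congr (fun a _ => ?_)
      rw [Bool.eq_iff_iff]
      simp
    -- A's sorted list is the bucket concatenation
    rw [sorted_rev_eq_flatMap (fun p => p.2) ks hksp
          (cand.map (fun n => (n, C.getD n 0)))
          (by intro p hp; obtain ⟨n, hn, rfl⟩ := List.mem_map.mp hp; exact hmem n hn)]
    rw [PySem.List.foldl_append_eq_flatMap]
    simp only [List.nil_append]
    rw [PySem.List.slice_to (b := 6)]
    · rw [PySem.List.slice_to (b := 6)]
      · rw [List.map_take, List.map_flatMap]
        congr 1
        congr 1
        funext k
        show List.map (fun p => p.1)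
            (List.filter (fun x => decide (x.2 = k)) (cand.map (fun n => (n, C.getD n 0))))
          = (cand.foldl (fun (d : PySem.Dict Int (List Int)) n =>
              d.modify (C.getD n 0) [] (· ++ [n])) PySem.Dict.empty).getD k []
        rw [hbucket k, List.filter_map, List.map_map]
        simp [Function.comp_def]
      · norm_num
    · norm_num
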